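-- pv_equiv track=rewrite | github.com/eivenlour/396-A5 | nim_game.py | init_input_is_valid
-- ===== SOURCE A (Python) =====
-- def init_input_is_valid(init_input_string):
--     init_input_list = convert_input(init_input_string)
--     converted_list = []
--
--     for each_item in init_input_list:
--         # Check is all items are integers
--         if not is_integer(each_item):
--             return False, None
--         # Check if the number of stones in each pile is greater than 0
--         if int(each_item) == 0:
--             return False, None
--         converted_list.append(int(each_item))
--
--     return True, converted_list
--
-- def convert_input(input_string):
--     input_string = input_string.split()
--     input_list = []
--     for each_item in input_string:
--         input_list.append(each_item)
--     return input_list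
--
-- def is_integer(char):
--     try:
--         int(char)
--     except ValueError:
--         return False
--     return True
-- ===== SOURCE B (Python) =====
-- def init_input_is_valid(init_input_string):
--     piles = _piles(init_input_string.split())
--     if piles is None:
--         return False, None
--     return True, piles
--
--
-- def _piles(tokens):
--     # Divide and conquer: parse/validate each half independently, merge.
--     # Returns the list of piles, or None if some token is not an integer
--     # or is zero.  Order of discovery of a bad token does not matter
--     # because the function is side-effect-free.
--     if not tokens:
--         return []
--     if len(tokens) == 1:
--         try:
--             n = int(tokens[0])
--         except ValueError:
--             return None
--         return None if n == 0 else [n]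
--     mid = len(tokens) // 2
--     left = _piles(tokens[:mid])
--     right = _piles(tokens[mid:])
--     if left is None or right is None:
--         return None
--     return left + right
-- ===== Notes on version B (the rewrite author's own statement) =====
-- stated objective: alternative
-- what changed: Replaces A's helper-based left-to-right loop with early returns (convert_input copy loop, is_integer try-probe, two int() calls per token, accumulator append) by a divide-and-conquer recursion that splits the token list in halves, parses/validates each half independently and merges the results, exploiting that order of discovery of a bad token cannot matter.
import Mathlib
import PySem

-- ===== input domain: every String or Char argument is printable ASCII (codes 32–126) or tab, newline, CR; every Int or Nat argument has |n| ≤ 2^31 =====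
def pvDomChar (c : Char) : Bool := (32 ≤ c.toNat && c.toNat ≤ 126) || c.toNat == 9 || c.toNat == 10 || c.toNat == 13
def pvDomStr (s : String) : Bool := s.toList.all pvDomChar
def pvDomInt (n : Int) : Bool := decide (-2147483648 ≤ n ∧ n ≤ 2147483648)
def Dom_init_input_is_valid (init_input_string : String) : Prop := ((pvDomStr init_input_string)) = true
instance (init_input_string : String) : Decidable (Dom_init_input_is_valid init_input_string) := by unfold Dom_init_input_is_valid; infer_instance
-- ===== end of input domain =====

-- B replaces A's helper-based left-to-right early-return loop by a divide-and-conquer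
-- recursion over the token list (parse each half, merge); an alternative decomposition,
-- correct because the function is side-effect-free so discovery order cannot matter.

-- ===== PORT A =====
-- is_integer(char): does int(char) succeed?
def pvIsInteger (t : String) : Bool :=
  match PySem.Int.ofStr? t with
  | none => false
  | some _ => true

-- convert_input: split then copy element by element
def pvConvertInput (input_string : String) : List String :=
  (PySem.Str.split₀ input_string).foldl (fun acc t => acc ++ [t]) []

-- A's main loop with its accumulator and early returns
def pvInitLoop : List String → List Int → Bool × Option (List Int)
  | [], acc => (true, some acc)
  | t :: ts, acc =>
    if !pvIsInteger t then (false, none)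
    else
      match PySem.Int.ofStr? t with
      | none => (false, none)
      | some n => if n == 0 then (false, none) else pvInitLoop ts (acc ++ [n])

def init_input_is_valid (init_input_string : String) : Bool × Option (List Int) :=
  pvInitLoop (pvConvertInput init_input_string) []

-- ===== PORT B =====
-- _piles(tokens): divide and conquer; None = some token invalid.
-- len(tokens) // 2 on a nonnegative length is exactly Nat division;
-- tokens[:mid] / tokens[mid:] are PySem.List.slice with the Nat bound mid.
def pvPilesGo : Nat → List String → Option (List Int)
  | _, [] => some []
  | _, [t] =>
    match PySem.Int.ofStr? t with
    | none => none
    | some n => if n == 0 then none else some [n]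
  | 0, _ :: _ :: _ => none   -- fuel guard only (never reached: pvPiles passes fuel = length)
  | fuel + 1, a :: b :: l =>
    let mid : Nat := (a :: b :: l).length / 2
    match pvPilesGo fuel (PySem.List.slice (a :: b :: l) none (some (mid : Int))),
          pvPilesGo fuel (PySem.List.slice (a :: b :: l) (some (mid : Int)) none) with
    | some left, some right => some (left ++ right)
    | _, _ => none

def pvPiles (ts : List String) : Option (List Int) := pvPilesGo ts.length ts

def init_input_is_valid_alt (init_input_string : String) : Bool × Option (List Int) :=
  match pvPiles (PySem.Str.split₀ init_input_string) with
  | none => (false, none)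
  | some piles => (true, some piles)

-- ===== PRECONDITION & SPEC =====
def Spec_init_input_is_valid (init_input_string : String) (out : Bool × Option (List Int)) : Prop := out = init_input_is_valid_alt init_input_string
instance (init_input_string : String) (out : Bool × Option (List Int)) : Decidable (Spec_init_input_is_valid init_input_string out) := by unfold Spec_init_input_is_valid; infer_instance

-- ===== CLAIM (what is proved, stated in full; the proofs are below) =====
def Claim_equal_init_input_is_valid : Prop := ∀ (init_input_string : String), Dom_init_input_is_valid init_input_string → Spec_init_input_is_valid init_input_string (init_input_is_valid init_input_string)

-- ===== LEMMAS AND PROOFS =====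

-- canonical form both programs compute: parse all tokens, reject a zero
def pvSpecF (ts : List String) : Option (List Int) :=
  match ts.mapM PySem.Int.ofStr? with
  | none => none
  | some ns => if ns.any (· == 0) then none else some ns

theorem pvConvertInput_eq (s : String) : pvConvertInput s = PySem.Str.split₀ s := by
  unfold pvConvertInput
  induction PySem.Str.split₀ s with
  | nil => rfl
  | cons t ts ih =>
    rw [List.foldl_cons, PySem.List.foldl_append_singleton]
    simp

theorem pvInitLoop_eq (ts : List String) (acc : List Int) :
    pvInitLoop ts acc =
      match pvSpecF ts with
      | none => (false, none)
      | some ns => (true, some (acc ++ ns)) := by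
  induction ts generalizing acc with
  | nil => simp [pvInitLoop, pvSpecF]
  | cons t ts ih =>
    unfold pvInitLoop pvIsInteger pvSpecF
    cases h : PySem.Int.ofStr? t with
    | none => simp [List.mapM_cons, h]
    | some n =>
      simp only [List.mapM_cons, h, Bool.not_true, Bool.false_eq_true, if_false,
        Option.pure_def, Option.bind_eq_bind]
      by_cases hn : n = 0
      · subst hn
        cases hm : ts.mapM PySem.Int.ofStr? <;> simp
      · rw [if_neg (by simpa using hn), ih]
        unfold pvSpecF
        cases hm : ts.mapM PySem.Int.ofStr? with
        | none => simp
        | some ns =>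
          by_cases hz : ns.any (· == 0)
          · simp [hz]
          · simp [hz, hn]

theorem pvSpecF_append (l r : List String) :
    pvSpecF (l ++ r) =
      match pvSpecF l, pvSpecF r with
      | some a, some b => some (a ++ b)
      | _, _ => none := by
  unfold pvSpecF
  rw [List.mapM_append]
  cases hl : l.mapM PySem.Int.ofStr? with
  | none => simp
  | some as =>
    cases hr : r.mapM PySem.Int.ofStr? with
    | none => simp
    | some bs =>
      by_cases ha : as.any (· == 0) <;> by_cases hb : bs.any (· == 0) <;>
        simp [ha, hb, List.any_append]

theorem pvPilesGo_eq (fuel : Nat) : ∀ ts : List String, ts.length ≤ fuel + 1 →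
    pvPilesGo fuel ts = pvSpecF ts := by
  induction fuel with
  | zero =>
    intro ts h
    rcases ts with _ | ⟨a, _ | ⟨b, l⟩⟩
    · simp [pvPilesGo, pvSpecF]
    · unfold pvPilesGo pvSpecF
      cases hp : PySem.Int.ofStr? a with
      | none => simp [List.mapM_cons, hp]
      | some m => by_cases hm : m = 0 <;> simp [List.mapM_cons, hp, hm]
    · simp only [List.length_cons] at h; omega
  | succ fuel ih =>
    intro ts h
    rcases ts with _ | ⟨a, _ | ⟨b, l⟩⟩
    · simp [pvPilesGo, pvSpecF]
    · unfold pvPilesGo pvSpecF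
      cases hp : PySem.Int.ofStr? a with
      | none => simp [List.mapM_cons, hp]
      | some m => by_cases hm : m = 0 <;> simp [List.mapM_cons, hp, hm]
    · simp only [List.length_cons] at h
      unfold pvPilesGo
      simp only [PySem.List.slice_to_natCast, PySem.List.slice_from_natCast]
      rw [ih _ (by simp only [List.length_take, List.length_cons]; omega),
          ih _ (by simp only [List.length_drop, List.length_cons]; omega)]
      conv_rhs => rw [← List.take_append_drop ((a :: b :: l).length / 2) (a :: b :: l),
        pvSpecF_append]

theorem pvPiles_eq (ts : List String) : pvPiles ts = pvSpecF ts :=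
  pvPilesGo_eq ts.length ts (Nat.le_succ _)

-- ===== VERDICT (by name: the statement is the Claim_ definition above) =====
theorem init_input_is_valid_spec : Claim_equal_init_input_is_valid := by
  intro s _
  unfold Spec_init_input_is_valid init_input_is_valid init_input_is_valid_alt
  rw [pvConvertInput_eq, pvInitLoop_eq, pvPiles_eq]
  unfold pvSpecF
  cases (PySem.Str.split₀ s).mapM PySem.Int.ofStr? with
  | none => simp
  | some ns => by_cases h : ns.any (· == 0) <;> simp [h]
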